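-- pv_equiv track=rewrite | github.com/maxwell-ng/degree-projects | text_analysis_app.py | calcScoresInWord
-- ===== SOURCE A (Python) =====
-- def isLastLetter(name, i):
--     """
--     Check if the character at position i in name is the last letter of a word, where name is in CamelCase.
--     In this case, it means it is followed by an upper case character (indicating a next word),
--     or is the last character of the whole name.
--
--     returns: true if name[i] is last letter of a word as described above
--     """
--     return i == len(name) -1 or name[i+1].isupper()
--
-- def calcScoresInWord(nameCamelCase, letterValues):
--     """
--     Calculate values for each character in a name.
--     Name is expected to be in CamelCase.
--
--     returns: a list of scores where list[i] is the score for name[i]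
--     """
--     name = nameCamelCase # making the variable name shorter to look nicer
--     charWordPos = 0 # tracker of a letter's position in a word (first to last)
--     scores = [-1] * len(name) # scores array with same indices as input word
--     for i in range(len(name)):
--         if charWordPos == 0:
--             #first letter of a word
--             scores[i] = 0
--         elif isLastLetter(name, i):
--             #last letter of a word (or of the whole name)
--             scores[i] = 5 if name[i].upper() != 'E' else 20
--         else:
--             #middle letter
--             bonus = charWordPos if charWordPos <3 else 3 # 1 for 2nd letter, 2 for 3rd, 3 for 4th+
--             scores[i] = letterValues[name[i].upper()] + bonus
--         # increment charWordPos, or reset to 0 if last letter of word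
--         charWordPos = 0 if isLastLetter(name,i) else charWordPos + 1
--     return scores
-- ===== SOURCE B (Python) =====
-- def calcScoresInWord(nameCamelCase, letterValues):
--     """
--     Calculate values for each character in a name (CamelCase expected).
--     Different decomposition: split the name into words first, then score
--     each word positionally.
--     """
--     # split into CamelCase word segments
--     words = []
--     cur = ""
--     for ch in nameCamelCase:
--         if cur and ch.isupper():
--             words.append(cur)
--             cur = ch
--         else:
--             cur += ch
--     if cur:
--         words.append(cur)
--     # score each word: first letter 0, last letter 5/20, middle = value + capped bonus
--     scores = []
--     for w in words:
--         for pos, ch in enumerate(w):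
--             if pos == 0:
--                 scores.append(0)
--             elif pos == len(w) - 1:
--                 scores.append(20 if ch.upper() == 'E' else 5)
--             else:
--                 scores.append(letterValues[ch.upper()] + min(pos, 3))
--     return scores
-- ===== Notes on version B (the rewrite author's own statement) =====
-- stated objective: alternative
-- what changed: Replaces the single online scan with a lookahead-driven position counter by a two-phase decomposition: first split the CamelCase name into word segments, then score each word purely by position within it.
import Mathlib
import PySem

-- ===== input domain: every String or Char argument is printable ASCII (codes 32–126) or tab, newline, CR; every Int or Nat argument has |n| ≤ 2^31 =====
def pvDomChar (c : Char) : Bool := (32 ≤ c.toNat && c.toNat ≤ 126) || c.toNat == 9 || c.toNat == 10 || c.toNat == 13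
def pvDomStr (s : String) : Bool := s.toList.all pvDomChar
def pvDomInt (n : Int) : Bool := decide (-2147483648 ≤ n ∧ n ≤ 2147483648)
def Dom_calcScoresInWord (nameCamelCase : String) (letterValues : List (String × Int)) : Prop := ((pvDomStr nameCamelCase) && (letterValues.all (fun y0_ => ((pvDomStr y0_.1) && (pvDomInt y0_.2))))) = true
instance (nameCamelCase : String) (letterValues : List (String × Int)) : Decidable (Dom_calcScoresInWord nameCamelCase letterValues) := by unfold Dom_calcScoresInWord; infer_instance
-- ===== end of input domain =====

-- B scores the name by first splitting it into CamelCase word segments and then scoring each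
-- word positionally (a different decomposition, same cost); equivalence is about return values.

-- ===== PORT A =====
def pvIsLastLetter (name : List Char) (i : Nat) : Bool :=
  i == name.length - 1 || PySem.Chars.isupper (name.getD (i + 1) ' ')

-- the body of A's for-loop, as a named step function over the state (scores, charWordPos)
def pvStepA (name : List Char) (letterValues : List (String × Int))
    (st : List Int × Nat) (i : Nat) : List Int × Nat :=
  let scores :=
    if st.2 = 0 then
      st.1.set i 0
    else if pvIsLastLetter name i then
      st.1.set i (if PySem.Chars.upperChar (name.getD i ' ') ≠ 'E' then 5 else 20)
    else
      let bonus : Int := if st.2 < 3 then (st.2 : Int) else 3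
      st.1.set i (((PySem.Dict.mk letterValues).get?
        (String.ofList [PySem.Chars.upperChar (name.getD i ' ')])).getD 0 + bonus)
  (scores, if pvIsLastLetter name i then 0 else st.2 + 1)

def calcScoresInWord (nameCamelCase : String) (letterValues : List (String × Int)) : List Int :=
  let name := nameCamelCase.toList
  ((List.range name.length).foldl (pvStepA name letterValues)
    (List.replicate name.length (-1), 0)).1

-- ===== PORT B =====
-- score of position pos within the word w (the body of B's inner loop)
def pvScoreF (letterValues : List (String × Int)) (w : List Char) (pos : Nat) : Int :=
  if pos = 0 then 0
  else if pos = w.length - 1 then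
    (if PySem.Chars.upperChar (w.getD pos ' ') == 'E' then 20 else 5)
  else
    ((PySem.Dict.mk letterValues).get?
      (String.ofList [PySem.Chars.upperChar (w.getD pos ' ')])).getD 0 + min (pos : Int) 3

def pvScoreWord (letterValues : List (String × Int)) (w : List Char) : List Int :=
  (List.range w.length).map (pvScoreF letterValues w)

def calcScoresInWord_alt (nameCamelCase : String) (letterValues : List (String × Int)) : List Int :=
  let st := nameCamelCase.toList.foldl
    (fun (st : List (List Char) × List Char) ch =>
      if !st.2.isEmpty && PySem.Chars.isupper ch then (st.1 ++ [st.2], [ch])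
      else (st.1, st.2 ++ [ch]))
    ([], [])
  let words := if st.2.isEmpty then st.1 else st.1 ++ [st.2]
  words.flatMap (pvScoreWord letterValues)

-- ===== PRECONDITION & SPEC =====
-- Pre_ excludes exactly the inputs where some middle letter of a word has no entry for its
-- uppercased one-char key in letterValues: there Python A raises KeyError (and so does B).
def Pre_calcScoresInWord (nameCamelCase : String) (letterValues : List (String × Int)) : Prop :=
  ∀ i ∈ List.range nameCamelCase.toList.length,
    (0 < i ∧ PySem.Chars.isupper (nameCamelCase.toList.getD i ' ') = false ∧
      i + 1 < nameCamelCase.toList.length ∧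
      PySem.Chars.isupper (nameCamelCase.toList.getD (i + 1) ' ') = false) →
    ((PySem.Dict.mk letterValues).get?
      (String.ofList [PySem.Chars.upperChar (nameCamelCase.toList.getD i ' ')])).isSome = true

instance (nameCamelCase : String) (letterValues : List (String × Int)) : Decidable (Pre_calcScoresInWord nameCamelCase letterValues) := by
  unfold Pre_calcScoresInWord; infer_instance

def pvWitness_calcScoresInWord : String × (List (String × Int)) :=
  ("CamelCase", [("A", 1), ("M", 2), ("E", 3), ("S", 4)])

def Spec_calcScoresInWord (nameCamelCase : String) (letterValues : List (String × Int)) (out : List Int) : Prop := out = calcScoresInWord_alt nameCamelCase letterValues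
instance (nameCamelCase : String) (letterValues : List (String × Int)) (out : List Int) : Decidable (Spec_calcScoresInWord nameCamelCase letterValues out) := by unfold Spec_calcScoresInWord; infer_instance

-- ===== CLAIM (what is proved, stated in full; the proofs are below) =====
def Claim_equal_calcScoresInWord : Prop := ∀ (nameCamelCase : String) (letterValues : List (String × Int)), Dom_calcScoresInWord nameCamelCase letterValues → Pre_calcScoresInWord nameCamelCase letterValues → Spec_calcScoresInWord nameCamelCase letterValues (calcScoresInWord nameCamelCase letterValues)

-- ===== LEMMAS AND PROOFS =====

-- the common characterisation: scores of the remaining suffix, given the in-word position p of its head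
def pvSpecL (lv : List (String × Int)) : List Char → Nat → List Int
  | [], _ => []
  | c :: rs, p =>
    let last := rs.isEmpty || PySem.Chars.isupper (rs.headD ' ')
    (if p = 0 then (0 : Int)
     else if last then (if PySem.Chars.upperChar c ≠ 'E' then 5 else 20)
     else ((PySem.Dict.mk lv).get? (String.ofList [PySem.Chars.upperChar c])).getD 0 +
       (if p < 3 then (p : Int) else 3))
    :: pvSpecL lv rs (if last then 0 else p + 1)

-- recursive form of B's word splitter
def pvSplitRec : List Char → List Char → List (List Char)
  | [], cur => if cur.isEmpty then [] else [cur]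
  | c :: rs, cur =>
    if !cur.isEmpty && PySem.Chars.isupper c then cur :: pvSplitRec rs [c]
    else pvSplitRec rs (cur ++ [c])

def pvTailWords (rs : List Char) : List (List Char) :=
  match rs.dropWhile (fun c => !PySem.Chars.isupper c) with
  | [] => []
  | c :: rs' => pvSplitRec rs' [c]

lemma pvTake_set {l : List Int} {i : Nat} (v : Int) (h : i < l.length) :
    (l.set i v).take (i + 1) = l.take i ++ [v] := by
  rw [List.set_eq_take_append_cons_drop, if_pos h]
  rw [show i + 1 = (l.take i).length + 1 by simp [h.le]]
  rw [List.take_append]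
  simp

lemma pvHeadD_drop (l : List Char) (i : Nat) (d : Char) : (l.drop i).headD d = l.getD i d := by
  rw [List.headD_eq_head?, List.head?_drop, List.getD_eq_getElem?_getD]

lemma pvLast_eq (name : List Char) (i : Nat) (h : i < name.length) :
    pvIsLastLetter name i
      = ((name.drop (i + 1)).isEmpty || PySem.Chars.isupper ((name.drop (i + 1)).headD ' ')) := by
  unfold pvIsLastLetter
  rw [pvHeadD_drop]
  congr 1
  have hde : (name.drop (i + 1)).isEmpty = decide (name.length ≤ i + 1) := by
    by_cases h1 : name.length ≤ i + 1
    · simp [List.drop_eq_nil_of_le h1, h1]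
    · have hne : name.drop (i + 1) ≠ [] := by
        rw [Ne, List.drop_eq_nil_iff]; omega
      have hf : (name.drop (i + 1)).isEmpty = false := by
        rw [← Bool.not_eq_true, List.isEmpty_iff]; exact hne
      simp [hf, h1]
  rw [hde]
  by_cases hc : i = name.length - 1
  · have h2 : name.length ≤ i + 1 := by omega
    rw [hc]
    simp only [beq_self_eq_true]
    symm
    rw [decide_eq_true_eq]
    omega
  · have h2 : ¬ name.length ≤ i + 1 := by omega
    simp [hc, h2]

lemma pvFoldA (name : List Char) (lv : List (String × Int)) :
    ∀ (k i : Nat) (scores : List Int) (p : Nat), scores.length = name.length →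
      name.length - i = k →
      ((List.range' i k).foldl (pvStepA name lv) (scores, p)).1
        = scores.take i ++ pvSpecL lv (name.drop i) p := by
  intro k
  induction k with
  | zero =>
    intro i scores p hlen hk
    have h1 : name.length ≤ i := by omega
    have h2 : name.drop i = [] := List.drop_eq_nil_of_le h1
    simp [h2, pvSpecL, List.take_of_length_le (hlen ▸ h1)]
  | succ k ih =>
    intro i scores p hlen hk
    have hi : i < name.length := by omega
    rw [List.range'_succ, List.foldl_cons]
    have hstep : pvStepA name lv (scores, p) i
        = (if p = 0 then scores.set i 0
           else if pvIsLastLetter name i then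
             scores.set i (if PySem.Chars.upperChar (name.getD i ' ') ≠ 'E' then 5 else 20)
           else
             scores.set i (((PySem.Dict.mk lv).get?
               (String.ofList [PySem.Chars.upperChar (name.getD i ' ')])).getD 0 +
               (if p < 3 then (p : Int) else 3)),
           if pvIsLastLetter name i then 0 else p + 1) := rfl
    rw [hstep]
    set v : Int := if p = 0 then 0
      else if pvIsLastLetter name i then
        (if PySem.Chars.upperChar (name.getD i ' ') ≠ 'E' then 5 else 20)
      else ((PySem.Dict.mk lv).get?
        (String.ofList [PySem.Chars.upperChar (name.getD i ' ')])).getD 0 +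
        (if p < 3 then (p : Int) else 3) with hv
    have hsets : (if p = 0 then scores.set i 0
        else if pvIsLastLetter name i then
          scores.set i (if PySem.Chars.upperChar (name.getD i ' ') ≠ 'E' then 5 else 20)
        else
          scores.set i (((PySem.Dict.mk lv).get?
            (String.ofList [PySem.Chars.upperChar (name.getD i ' ')])).getD 0 +
            (if p < 3 then (p : Int) else 3))) = scores.set i v := by
      rw [hv]; split_ifs <;> rfl
    rw [hsets]
    rw [ih (i + 1) (scores.set i v) _ (by simp [hlen]) (by omega)]
    rw [List.drop_eq_getElem_cons hi]
    rw [pvTake_set v (hlen ▸ hi)]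
    simp only [pvSpecL]
    rw [List.append_assoc, List.singleton_append]
    congr 2
    · rw [hv, pvLast_eq name i hi, List.getD_eq_getElem name ' ' hi]
    · rw [pvLast_eq name i hi]

lemma pvA_spec (name : List Char) (lv : List (String × Int)) :
    calcScoresInWord (String.ofList name) lv = pvSpecL lv name 0 := by
  unfold calcScoresInWord
  simp only [String.toList_ofList]
  rw [List.range_eq_range']
  rw [pvFoldA name lv name.length 0 _ 0 (by simp) (by omega)]
  simp

lemma pvScoreWord_drop (lv : List (String × Int)) (w : List Char) (k : Nat) (h : k ≤ w.length) :
    (pvScoreWord lv w).drop k = (List.range' k (w.length - k)).map (pvScoreF lv w) := by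
  unfold pvScoreWord
  apply List.ext_getElem
  · simp
  · intro i h1 h2
    simp [List.getElem_range']

lemma pvScoreWord_cons (lv : List (String × Int)) (w : List Char) (h : w ≠ []) :
    pvScoreWord lv w = 0 :: (List.range' 1 (w.length - 1)).map (pvScoreF lv w) := by
  cases w with
  | nil => exact absurd rfl h
  | cons a t =>
    unfold pvScoreWord
    rw [List.range_eq_range']
    simp only [List.length_cons]
    rw [List.range'_succ]
    simp [pvScoreF]

def pvFinal (st : List (List Char) × List Char) : List (List Char) :=
  if st.2.isEmpty then st.1 else st.1 ++ [st.2]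

lemma pvSplit_fold (rest : List Char) :
    ∀ (words : List (List Char)) (cur : List Char),
      pvFinal (rest.foldl
        (fun (st : List (List Char) × List Char) ch =>
          if !st.2.isEmpty && PySem.Chars.isupper ch then (st.1 ++ [st.2], [ch])
          else (st.1, st.2 ++ [ch])) (words, cur))
      = words ++ pvSplitRec rest cur := by
  induction rest with
  | nil =>
    intro words cur
    simp only [List.foldl_nil, pvSplitRec, pvFinal]
    by_cases hc : cur.isEmpty <;> simp [hc]
  | cons c rs ih =>
    intro words cur
    by_cases hc : (!cur.isEmpty && PySem.Chars.isupper c) = true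
    · simp only [List.foldl_cons, hc, if_true, pvSplitRec]
      rw [ih (words ++ [cur]) [c]]
      simp
    · have hc' : (!cur.isEmpty && PySem.Chars.isupper c) = false := by simpa using hc
      simp only [List.foldl_cons, hc', Bool.false_eq_true, if_false, pvSplitRec]
      exact ih words (cur ++ [c])

lemma pvSplitRec_decomp (rs : List Char) :
    ∀ (w : List Char), w ≠ [] →
      pvSplitRec rs w = (w ++ rs.takeWhile (fun c => !PySem.Chars.isupper c)) :: pvTailWords rs := by
  induction rs with
  | nil => intro w hw; simp [pvSplitRec, pvTailWords, List.isEmpty_iff, hw]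
  | cons c rs' ih =>
    intro w hw
    by_cases hu : PySem.Chars.isupper c = true
    · simp [pvSplitRec, pvTailWords, List.isEmpty_iff, hw, hu, List.takeWhile_cons,
        List.dropWhile_cons]
    · have hu' : PySem.Chars.isupper c = false := by simpa using hu
      simp only [pvSplitRec, hu', Bool.and_false, Bool.false_eq_true, if_neg, ite_false]
      rw [ih (w ++ [c]) (by simp)]
      simp [pvTailWords, List.takeWhile_cons, List.dropWhile_cons, hu']

lemma pvFlat_head (lv : List (String × Int)) (rs cur : List Char) (h : cur ≠ []) :
    (pvSplitRec rs cur).flatMap (pvScoreWord lv)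
      = 0 :: ((pvSplitRec rs cur).flatMap (pvScoreWord lv)).drop 1 := by
  rw [pvSplitRec_decomp rs cur h]
  rw [List.flatMap_cons]
  rw [pvScoreWord_cons lv _ (by simp [h])]
  simp

lemma pvMin_eq (p : Nat) : min (p : Int) 3 = if p < 3 then (p : Int) else 3 := by
  by_cases hp : p < 3 <;> rw [Int.min_def] <;> split_ifs <;> first | rfl | omega

lemma pvG (lv : List (String × Int)) (rs : List Char) :
    ∀ (cur : List Char), cur ≠ [] →
      ((pvSplitRec rs cur).flatMap (pvScoreWord lv)).drop cur.length
        = pvSpecL lv rs (if PySem.Chars.isupper (rs.headD ' ') then 0 else cur.length) := by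
  induction rs with
  | nil =>
    intro cur hc
    have hs : pvSplitRec [] cur = [cur] := by
      simp [pvSplitRec, List.isEmpty_iff, hc]
    rw [hs]
    simp [pvSpecL, pvScoreWord, PySem.Chars.isupper]
  | cons c rs' ih =>
    intro cur hc
    have hcl : cur.length ≠ 0 := by simpa [List.length_eq_zero_iff] using hc
    by_cases hu : PySem.Chars.isupper c = true
    · have hsplit : pvSplitRec (c :: rs') cur = cur :: pvSplitRec rs' [c] := by
        simp [pvSplitRec, List.isEmpty_iff, hc, hu]
      rw [hsplit, List.flatMap_cons,
        List.drop_append_of_le_length (by simp [pvScoreWord])]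
      have h1 : (pvScoreWord lv cur).drop cur.length = [] := by
        simp [pvScoreWord]
      rw [h1, List.nil_append]
      rw [pvFlat_head lv rs' [c] (by simp)]
      have h2 := ih [c] (by simp)
      simp only [List.length_cons, List.length_nil, Nat.zero_add] at h2
      rw [h2]
      have hhead : (c :: rs').headD ' ' = c := rfl
      rw [hhead, if_pos hu]
      simp only [pvSpecL]
      refine List.cons_eq_cons.mpr ⟨by simp, ?_⟩
      cases rs' with
      | nil => simp [pvSpecL]
      | cons d t => simp
    · have hu' : PySem.Chars.isupper c = false := by simpa using hu
      have hsplit : pvSplitRec (c :: rs') cur = pvSplitRec rs' (cur ++ [c]) := by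
        simp [pvSplitRec, hu']
      rw [hsplit]
      set ext := rs'.takeWhile (fun x => !PySem.Chars.isupper x) with hext
      set w := (cur ++ [c]) ++ ext with hw
      have hwlen : w.length = cur.length + 1 + ext.length := by simp [hw]; omega
      have hdecomp : pvSplitRec rs' (cur ++ [c]) = w :: pvTailWords rs' :=
        pvSplitRec_decomp rs' (cur ++ [c]) (by simp)
      have hgetD : w.getD cur.length ' ' = c := by
        have : w = cur ++ (c :: ext) := by simp [hw]
        rw [this]
        simp [List.getD_eq_getElem?_getD]
      have hlast : (ext = []) ↔ (rs'.isEmpty || PySem.Chars.isupper (rs'.headD ' ')) = true := by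
        cases rs' with
        | nil => simp [hext]
        | cons d t =>
          by_cases hud : PySem.Chars.isupper d = true
          · simp [hext, List.takeWhile_cons, hud]
          · have hud' : PySem.Chars.isupper d = false := by simpa using hud
            simp [hext, List.takeWhile_cons, hud']
      rw [hdecomp, List.flatMap_cons,
        List.drop_append_of_le_length (by simp [pvScoreWord, hwlen]; omega),
        pvScoreWord_drop lv w cur.length (by omega),
        show w.length - cur.length = ext.length + 1 by omega,
        List.range'_succ, List.map_cons]
      have h2 := ih (cur ++ [c]) (by simp)
      rw [hdecomp, List.flatMap_cons,
        List.drop_append_of_le_length (by simp [pvScoreWord, hwlen]),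
        pvScoreWord_drop lv w (cur ++ [c]).length (by simp [hwlen])] at h2
      simp only [List.length_append, List.length_cons, List.length_nil] at h2
      rw [show w.length - (cur.length + (0 + 1)) = ext.length by omega] at h2
      have hhead : (c :: rs').headD ' ' = c := rfl
      rw [hhead, hu']
      simp only [Bool.false_eq_true, if_false]
      simp only [pvSpecL, if_neg hcl]
      refine List.cons_eq_cons.mpr ⟨?_, ?_⟩
      · -- the score of c itself
        simp only [pvScoreF, if_neg hcl, hgetD]
        by_cases hl : ext = []
        · have hl2 := hlast.mp hl
          have hlen0 : ext.length = 0 := by simp [hl]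
          rw [if_pos (by omega : cur.length = w.length - 1), if_pos hl2]
          by_cases he : PySem.Chars.upperChar c = 'E' <;> simp [he]
        · have hl2 : (rs'.isEmpty || PySem.Chars.isupper (rs'.headD ' ')) = false := by
            rw [← Bool.not_eq_true]; exact fun hx => hl (hlast.mpr hx)
          have hlen1 : ext.length ≠ 0 := by simpa [List.length_eq_zero_iff] using hl
          rw [if_neg (by omega : ¬ cur.length = w.length - 1), hl2]
          simp only [Bool.false_eq_true, if_false]
          rw [pvMin_eq]
      · -- the scores of everything after c
        rw [show cur.length + (0 + 1) = cur.length + 1 by omega] at h2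
        rw [List.append_eq, h2]
        cases rs' with
        | nil => simp [pvSpecL]
        | cons d t => simp

lemma pvB_spec (name : List Char) (lv : List (String × Int)) :
    calcScoresInWord_alt (String.ofList name) lv = pvSpecL lv name 0 := by
  have hrfl : calcScoresInWord_alt (String.ofList name) lv
      = (pvFinal (name.foldl
          (fun (st : List (List Char) × List Char) ch =>
            if !st.2.isEmpty && PySem.Chars.isupper ch then (st.1 ++ [st.2], [ch])
            else (st.1, st.2 ++ [ch])) ([], []))).flatMap (pvScoreWord lv) := by
    simp only [calcScoresInWord_alt, String.toList_ofList, pvFinal]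
  rw [hrfl, pvSplit_fold name [] [], List.nil_append]
  cases name with
  | nil => simp [pvSplitRec, pvSpecL]
  | cons c rs =>
    have hs : pvSplitRec (c :: rs) [] = pvSplitRec rs [c] := by
      simp [pvSplitRec]
    rw [hs, pvFlat_head lv rs [c] (by simp)]
    have h2 := pvG lv rs [c] (by simp)
    simp only [List.length_cons, List.length_nil, Nat.zero_add] at h2
    rw [h2]
    simp only [pvSpecL, if_pos rfl]
    congr 1
    cases rs with
    | nil => simp [pvSpecL]
    | cons d t => simp

-- ===== VERDICT (by name: the statement is the Claim_ definition above) =====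
theorem calcScoresInWord_spec : Claim_equal_calcScoresInWord := by
  intro nameCamelCase lv _ _
  unfold Spec_calcScoresInWord
  have h1 := pvA_spec nameCamelCase.toList lv
  have h2 := pvB_spec nameCamelCase.toList lv
  rw [String.ofList_toList] at h1 h2
  rw [h1, h2]
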